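-- pv_equiv track=rewrite | github.com/avenet/hackerrank | algorithms/strings/two_characters.py | get_alternating_length
-- ===== SOURCE A (Python) =====
-- def get_alternating_length(
--     str_value,
--     first_letter,
--     second_letter
-- ):
--     previous_letter = None
--     counter = 0
--
--     for char_value in str_value:
--         if (
--             char_value in [first_letter, second_letter] and
--             previous_letter != char_value
--         ):
--             previous_letter = char_value
--             counter += 1
--         elif previous_letter == char_value:
--             return 0
--
--     return counter
-- ===== SOURCE B (Python) =====
-- def _leads(a, b):
--     # a's occurrence indices must strictly interleave ahead of b's:
--     # a[0] < b[0] < a[1] < b[1] < ...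
--     return (all(x < y for x, y in zip(a, b)) and
--             all(y < x for y, x in zip(b, a[1:])))
--
--
-- def get_alternating_length(str_value, first_letter, second_letter):
--     pf = [i for i, c in enumerate(str_value) if c == first_letter]
--     ps = [i for i, c in enumerate(str_value) if c == second_letter]
--     if first_letter == second_letter:
--         return len(pf) if len(pf) <= 1 else 0
--     n, m = len(pf), len(ps)
--     if abs(n - m) > 1:
--         return 0
--     if (n >= m and _leads(pf, ps)) or (m >= n and _leads(ps, pf)):
--         return n + m
--     return 0
-- ===== Notes on version B (the rewrite author's own statement) =====
-- stated objective: alternative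
-- what changed: Instead of scanning the string with previous-letter state, B collects the occurrence-index lists of each of the two letters separately and decides alternation arithmetically: the two sorted index lists must differ in length by at most 1 and perfectly interleave (pointwise comparisons), in which case the answer is the sum of their lengths.
import Mathlib
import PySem

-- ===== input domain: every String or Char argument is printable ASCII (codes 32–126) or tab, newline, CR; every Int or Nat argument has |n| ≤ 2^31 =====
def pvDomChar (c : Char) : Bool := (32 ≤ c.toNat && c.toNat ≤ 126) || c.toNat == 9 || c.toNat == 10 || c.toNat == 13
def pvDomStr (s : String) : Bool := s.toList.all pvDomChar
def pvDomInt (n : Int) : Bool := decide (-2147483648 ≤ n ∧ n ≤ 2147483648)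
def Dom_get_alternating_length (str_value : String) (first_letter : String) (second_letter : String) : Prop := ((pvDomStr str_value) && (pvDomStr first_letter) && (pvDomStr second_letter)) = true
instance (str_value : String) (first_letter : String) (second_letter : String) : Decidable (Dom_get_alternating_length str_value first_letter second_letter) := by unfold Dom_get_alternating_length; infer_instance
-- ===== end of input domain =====

-- B decides alternation from the two letters' occurrence-index lists (length difference ≤ 1 and
-- pointwise interleaving of the sorted index lists) instead of A's stateful previous-letter scan.


-- ===== PORT A =====
-- A's loop: state (previous_letter, counter), early return 0 on a repeat.
def pvGoA (f s : String) : List Char → Option Char → Int → Int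
  | [], _, counter => counter
  | ch :: rest, prev, counter =>
    if (String.ofList [ch] == f || String.ofList [ch] == s) && !(prev == some ch) then
      pvGoA f s rest (some ch) (counter + 1)
    else if prev == some ch then 0
    else pvGoA f s rest prev counter

def get_alternating_length (str_value : String) (first_letter : String) (second_letter : String) : Int :=
  pvGoA first_letter second_letter str_value.toList none 0

-- ===== PORT B =====
-- _leads(a, b): a[0] < b[0] < a[1] < b[1] < ...
def pvLeads (a b : List Int) : Bool :=
  ((a.zip b).all fun p => p.1 < p.2) && ((b.zip a.tail).all fun p => p.1 < p.2)

def get_alternating_length_alt (str_value : String) (first_letter : String) (second_letter : String) : Int :=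
  let pf := ((PySem.List.enumerate str_value.toList 0).filter
              (fun ic => String.ofList [ic.2] == first_letter)).map Prod.fst
  let ps := ((PySem.List.enumerate str_value.toList 0).filter
              (fun ic => String.ofList [ic.2] == second_letter)).map Prod.fst
  if first_letter == second_letter then
    (if pf.length ≤ 1 then (pf.length : Int) else 0)
  else
    let n : Int := pf.length
    let m : Int := ps.length
    if 1 < (n - m).natAbs then 0
    else if (decide (m ≤ n) && pvLeads pf ps) || (decide (n ≤ m) && pvLeads ps pf) then n + m
    else 0

-- ===== PRECONDITION & SPEC =====
def Spec_get_alternating_length (str_value : String) (first_letter : String) (second_letter : String) (out : Int) : Prop := out = get_alternating_length_alt str_value first_letter second_letter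
instance (str_value : String) (first_letter : String) (second_letter : String) (out : Int) : Decidable (Spec_get_alternating_length str_value first_letter second_letter out) := by unfold Spec_get_alternating_length; infer_instance

-- ===== CLAIM (what is proved, stated in full; the proofs are below) =====
def Claim_equal_get_alternating_length : Prop := ∀ (str_value : String) (first_letter : String) (second_letter : String), Dom_get_alternating_length str_value first_letter second_letter → Spec_get_alternating_length str_value first_letter second_letter (get_alternating_length str_value first_letter second_letter)

-- ===== LEMMAS AND PROOFS =====

-- 'c in (first_letter, second_letter)'
def pvKeep (f s : String) (ch : Char) : Bool := String.ofList [ch] == f || String.ofList [ch] == s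

-- proof-side view of "no two adjacent equal characters"
def pvHasAdj : List Char → Bool
  | a :: b :: rest => a == b || pvHasAdj (b :: rest)
  | _ => false

-- A's loop computes: 0 if the kept subsequence has an adjacent repeat, else its length.
theorem pvGoA_eq (f s : String) (l : List Char) (prev : Option Char) (c : Int)
    (hp : ∀ p, prev = some p → pvKeep f s p = true) :
    pvGoA f s l prev c =
      if pvHasAdj (prev.toList ++ l.filter (pvKeep f s)) then 0
      else c + (l.filter (pvKeep f s)).length := by
  induction l generalizing prev c with
  | nil =>
    cases prev <;> simp [pvGoA, pvHasAdj]
  | cons ch rest ih =>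
    simp only [pvGoA]
    by_cases hk : pvKeep f s ch = true
    · by_cases hpe : prev = some ch
      · have hcond : ((String.ofList [ch] == f || String.ofList [ch] == s) && !(prev == some ch)) = false := by
          simp [hpe]
        rw [hcond]
        simp only [Bool.false_eq_true, if_false, hpe]
        simp only [beq_self_eq_true, if_true]
        rw [List.filter_cons_of_pos hk]
        simp [pvHasAdj]
      · have hcond : ((String.ofList [ch] == f || String.ofList [ch] == s) && !(prev == some ch)) = true := by
          have := hk; unfold pvKeep at this
          simp [this, hpe]
        rw [hcond]
        simp only [if_true]
        rw [ih (some ch) (c + 1) (by intro p hps; cases hps; exact hk)]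
        rw [List.filter_cons_of_pos hk]
        cases prev with
        | none =>
          simp only [Option.toList, List.nil_append, List.singleton_append, List.length_cons]
          split <;> push_cast <;> omega
        | some p =>
          have hpch : (p == ch) = false := by
            simp; intro h; exact hpe (by rw [h])
          simp only [Option.toList, List.singleton_append, pvHasAdj, hpch, Bool.false_or,
            List.length_cons]
          split <;> push_cast <;> omega
    · have hpe : prev ≠ some ch := by
        intro h; exact hk (hp ch h)
      have hcond : ((String.ofList [ch] == f || String.ofList [ch] == s) && !(prev == some ch)) = false := by
        have := hk; unfold pvKeep at this
        simp at this
        simp [this]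
      rw [hcond]
      simp only [Bool.false_eq_true, if_false]
      have : (prev == some ch) = false := by simp [hpe]
      rw [this]
      simp only [Bool.false_eq_true, if_false]
      rw [ih prev c hp, List.filter_cons_of_neg (by simpa using hk)]

-- proof-side view of B's index lists
def pvIdx (p : Char → Bool) (k : Int) : List Char → List Int
  | [] => []
  | c :: r => if p c then k :: pvIdx p (k + 1) r else pvIdx p (k + 1) r

theorem pvIdx_eq (p : Char → Bool) (l : List Char) (k : Int) :
    ((PySem.List.enumerate l k).filter (fun ic => p ic.2)).map Prod.fst = pvIdx p k l := by
  induction l generalizing k with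
  | nil => simp [pvIdx, PySem.List.enumerate_nil]
  | cons c r ih =>
    rw [PySem.List.enumerate_cons]
    by_cases h : p c = true
    · simp [pvIdx, h, List.filter_cons, ih]
    · simp [pvIdx, h, List.filter_cons, ih]

theorem pvIdx_length (p : Char → Bool) (l : List Char) (k : Int) :
    (pvIdx p k l).length = (l.filter p).length := by
  induction l generalizing k with
  | nil => rfl
  | cons c r ih =>
    by_cases h : p c = true <;> simp [pvIdx, List.filter_cons, h, ih]

theorem pvIdx_bound (p : Char → Bool) (l : List Char) (k : Int) :
    ∀ x ∈ pvIdx p k l, k ≤ x := by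
  induction l generalizing k with
  | nil => intro x hx; simp [pvIdx] at hx
  | cons c r ih =>
    intro x hx
    by_cases h : p c = true
    · simp only [pvIdx, h, if_true, List.mem_cons] at hx
      rcases hx with rfl | hx
      · exact le_refl x
      · have := ih (k + 1) x hx; omega
    · simp only [pvIdx, h, Bool.false_eq_true, if_false] at hx
      have := ih (k + 1) x hx; omega

-- "the kept characters alternate, a p-character first"
def pvPat (p q : Char → Bool) : List Char → Bool
  | [] => true
  | c :: r => if p c then pvPat q p r else if q c then false else pvPat p q r

theorem leads_cons (k : Int) (a b : List Int) (hb : ∀ x ∈ b, k < x) :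
    pvLeads (k :: a) b = pvLeads b a := by
  cases b with
  | nil => simp [pvLeads]
  | cons j b' =>
    have hj : (decide (k < j)) = true := by simp [hb j (by simp)]
    simp only [pvLeads, List.zip_cons_cons, List.all_cons, List.tail_cons, hj, Bool.true_and]
    rw [Bool.and_comm]

-- core: B's length/interleaving condition = the alternation pattern, for any p q
theorem L2 (l : List Char) (p q : Char → Bool)
    (hd : ∀ c, p c = true → q c = true → False) (k : Int) :
    (((pvIdx p k l).length = (pvIdx q k l).length ∨
      (pvIdx p k l).length = (pvIdx q k l).length + 1) ∧
     pvLeads (pvIdx p k l) (pvIdx q k l) = true) ↔ pvPat p q l = true := by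
  induction l generalizing p q k with
  | nil => simp [pvIdx, pvPat, pvLeads]
  | cons c r ih =>
    by_cases hp : p c = true
    · have hq : q c = false := by
        cases hqc : q c
        · rfl
        · exact absurd (hd c hp hqc) (by simp)
      simp only [pvPat, hp, if_true, pvIdx, hq, Bool.false_eq_true, if_false]
      rw [← ih q p (fun c hq' hp' => hd c hp' hq') (k + 1)]
      have hb : ∀ x ∈ pvIdx q (k + 1) r, k < x := by
        intro x hx; have := pvIdx_bound q r (k + 1) x hx; omega
      rw [leads_cons k (pvIdx p (k + 1) r) (pvIdx q (k + 1) r) hb]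
      constructor
      · rintro ⟨hlen, hld⟩
        refine ⟨?_, hld⟩
        simp only [List.length_cons] at hlen
        omega
      · rintro ⟨hlen, hld⟩
        refine ⟨?_, hld⟩
        simp only [List.length_cons]
        omega
    · by_cases hq : q c = true
      · simp only [pvPat, hp, Bool.false_eq_true, if_false, hq, if_true]
        simp only [pvIdx, hp, Bool.false_eq_true, if_false, hq, if_true]
        constructor
        · rintro ⟨hlen, hld⟩
          exfalso
          cases hpf : pvIdx p (k + 1) r with
          | nil =>
            rw [hpf] at hlen
            simp only [List.length_nil, List.length_cons] at hlen
            omega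
          | cons x a' =>
            rw [hpf] at hld
            simp only [pvLeads, List.zip_cons_cons, List.all_cons, Bool.and_eq_true,
              decide_eq_true_eq] at hld
            have hx : k + 1 ≤ x := pvIdx_bound p r (k + 1) x (by rw [hpf]; simp)
            omega
        · intro h; cases h
      · simp only [pvPat, hp, Bool.false_eq_true, if_false, hq, pvIdx]
        exact ih p q hd (k + 1)

-- alternation-free filtered list with all kept characters equal ⟺ at most one kept
theorem hasAdj_const (m : List Char) (h : ∀ a ∈ m, ∀ b ∈ m, a = b) :
    pvHasAdj m = false ↔ m.length ≤ 1 := by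
  match m with
  | [] => simp [pvHasAdj]
  | [x] => simp [pvHasAdj]
  | x :: y :: rest =>
    have : x = y := h x (by simp) y (by simp)
    subst this
    simp [pvHasAdj]

-- pat ⟺ filtered list is adjacency-free and starts (if nonempty) with a p-character
theorem pat_char (p q : Char → Bool)
    (hp : ∀ c c', p c = true → p c' = true → c = c')
    (hq : ∀ c c', q c = true → q c' = true → c = c')
    (hd : ∀ c, p c = true → q c = true → False) :
    ∀ l : List Char,
    pvPat p q l = true ↔
      (pvHasAdj (l.filter fun c => p c || q c) = false ∧
       ∀ c, (l.filter fun c => p c || q c).head? = some c → p c = true) := by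
  intro l
  induction l generalizing p q with
  | nil => simp [pvPat, pvHasAdj]
  | cons c r ih =>
    have hswap : (fun c => q c || p c) = (fun c => p c || q c) := by
      funext x; exact Bool.or_comm (q x) (p x)
    by_cases hpc : p c = true
    · simp only [pvPat, hpc, if_true]
      rw [ih q p hq hp (fun c hq' hp' => hd c hp' hq'), hswap]
      rw [List.filter_cons_of_pos (by simp [hpc])]
      cases hfr : r.filter (fun c => p c || q c) with
      | nil => simp [pvHasAdj, hpc]
      | cons d fr' =>
        have hdmem : d ∈ r.filter (fun c => p c || q c) := by rw [hfr]; simp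
        have hdkeep : (p d || q d) = true := (List.mem_filter.mp hdmem).2
        simp only [pvHasAdj, List.head?_cons, Option.some.injEq, Bool.or_eq_false_iff]
        constructor
        · rintro ⟨hadj, hdq⟩
          have hdq' : q d = true := hdq d rfl
          have hcd : (c == d) = false := by
            simp only [beq_eq_false_iff_ne, ne_eq]
            intro hcd; subst hcd; exact hd c hpc hdq'
          exact ⟨⟨hcd, hadj⟩, fun e he => he ▸ hpc⟩
        · rintro ⟨⟨hcd, hadj⟩, -⟩
          refine ⟨hadj, fun e he => ?_⟩
          subst he
          rcases Bool.or_eq_true_iff.mp hdkeep with hpd | hqd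
          · exact absurd (beq_iff_eq.mpr (hp c d hpc hpd)) (by simp [hcd])
          · exact hqd
    · by_cases hqc : q c = true
      · simp only [pvPat, hpc, Bool.false_eq_true, if_false, hqc, if_true]
        rw [List.filter_cons_of_pos (by simp [hqc])]
        simp only [List.head?_cons]
        constructor
        · intro h; cases h
        · rintro ⟨_, hhd⟩
          exact absurd (hhd c rfl) (by simp [hpc])
      · simp only [pvPat, hpc, Bool.false_eq_true, if_false, hqc]
        rw [List.filter_cons_of_neg (by simp [hpc, hqc])]
        exact ih p q hp hq hd

-- disjoint keeps: the filtered length splits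
theorem filter_or_length (p q : Char → Bool) (hd : ∀ c, p c = true → q c = true → False)
    (l : List Char) :
    (l.filter fun c => p c || q c).length = (l.filter p).length + (l.filter q).length := by
  induction l with
  | nil => rfl
  | cons c r ih =>
    by_cases hpc : p c = true
    · have hqc : q c = false := by
        cases hqc : q c
        · rfl
        · exact absurd (hd c hpc hqc) (by simp)
      simp [List.filter_cons, hpc, hqc, ih]
      omega
    · by_cases hqc : q c = true <;> simp [List.filter_cons, hpc, hqc, ih] <;> omega

-- singleton-string equality is character equality
theorem ofList_singleton_inj (c c' : Char) (h : String.ofList [c] = String.ofList [c']) : c = c' := by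
  have := congrArg String.toList h
  simpa using this

-- ===== VERDICT (by name: the statement is the Claim_ definition above) =====
theorem get_alternating_length_spec : Claim_equal_get_alternating_length := by
  intro sv f s _
  unfold Spec_get_alternating_length get_alternating_length
  rw [pvGoA_eq f s sv.toList none 0 (by intro p h; cases h)]
  simp only [Option.toList, List.nil_append, zero_add]
  simp only [get_alternating_length_alt]
  rw [pvIdx_eq (fun c => String.ofList [c] == f), pvIdx_eq (fun c => String.ofList [c] == s)]
  set p : Char → Bool := fun c => String.ofList [c] == f with hpdef
  set q : Char → Bool := fun c => String.ofList [c] == s with hqdef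
  set l := sv.toList with hldef
  have hkeep : pvKeep f s = fun c => p c || q c := by funext c; rfl
  rw [hkeep]
  have hpfun : ∀ c c', p c = true → p c' = true → c = c' := fun c c' hc hc' =>
    ofList_singleton_inj c c' ((eq_of_beq hc).trans (eq_of_beq hc').symm)
  have hqfun : ∀ c c', q c = true → q c' = true → c = c' := fun c c' hc hc' =>
    ofList_singleton_inj c c' ((eq_of_beq hc).trans (eq_of_beq hc').symm)
  by_cases hfs : f = s
  · -- both letters equal: at most one kept occurrence alternates
    rw [if_pos (beq_iff_eq.mpr hfs)]
    have hqp : q = p := by rw [hpdef, hqdef, hfs]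
    have hfil : (l.filter fun c => p c || q c) = l.filter p := by
      rw [hqp]; simp
    rw [hfil, pvIdx_length]
    have hconst : ∀ a ∈ l.filter p, ∀ b ∈ l.filter p, a = b := fun a ha b hb =>
      hpfun a b (List.of_mem_filter ha) (List.of_mem_filter hb)
    by_cases hlen : (l.filter p).length ≤ 1
    · rw [if_pos hlen, if_neg (show ¬ (pvHasAdj (l.filter p) = true) by
        simp [(hasAdj_const _ hconst).mpr hlen])]
    · rw [if_neg hlen, if_pos (by
        cases hA : pvHasAdj (l.filter p)
        · exact absurd ((hasAdj_const _ hconst).mp hA) hlen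
        · rfl)]
  · -- two distinct letters: interleaving of the index lists
    have hdisj : ∀ c, p c = true → q c = true → False := fun c hc hc' =>
      hfs ((eq_of_beq hc).symm.trans (eq_of_beq hc'))
    rw [if_neg (show ¬ ((f == s) = true) by simpa using hfs)]
    have hL2pq := L2 l p q hdisj 0
    have hL2qp := L2 l q p (fun c hq' hp' => hdisj c hp' hq') 0
    have hpatp := pat_char p q hpfun hqfun hdisj l
    have hpatq := pat_char q p hqfun hpfun (fun c hq' hp' => hdisj c hp' hq') l
    have hswap : (fun c => q c || p c) = (fun c => p c || q c) := by
      funext x; exact Bool.or_comm (q x) (p x)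
    rw [hswap] at hpatq
    set pf := pvIdx p 0 l with hpf
    set ps := pvIdx q 0 l with hps
    set F := l.filter (fun c => p c || q c) with hF
    have hNM : F.length = pf.length + ps.length := by
      rw [hF, hpf, hps, pvIdx_length, pvIdx_length]
      exact filter_or_length p q hdisj l
    by_cases hadj : pvHasAdj F = true
    · rw [if_pos hadj]
      by_cases habs : 1 < ((pf.length : Int) - (ps.length : Int)).natAbs
      · rw [if_pos habs]
      · rw [if_neg habs, if_neg (by
          intro hcond
          rcases Bool.or_eq_true_iff.mp hcond with hc | hc
          · rw [Bool.and_eq_true] at hc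
            have hle' : ps.length ≤ pf.length := by
              have := of_decide_eq_true hc.1; exact_mod_cast this
            have hpat : pvPat p q l = true := hL2pq.mp ⟨by omega, hc.2⟩
            rw [(hpatp.mp hpat).1] at hadj
            cases hadj
          · rw [Bool.and_eq_true] at hc
            have hle' : pf.length ≤ ps.length := by
              have := of_decide_eq_true hc.1; exact_mod_cast this
            have hpat : pvPat q p l = true := hL2qp.mp ⟨by omega, hc.2⟩
            rw [(hpatq.mp hpat).1] at hadj
            cases hadj)]
    · have hadjf : pvHasAdj F = false := by
        cases hA : pvHasAdj F
        · rfl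
        · exact absurd hA hadj
      rw [if_neg hadj]
      have hgoal : ∀ hone : pvPat p q l = true ∨ pvPat q p l = true,
          (F.length : Int) =
            (if 1 < ((pf.length : Int) - (ps.length : Int)).natAbs then 0
             else if ((decide ((ps.length : Int) ≤ (pf.length : Int)) && pvLeads pf ps) ||
                      (decide ((pf.length : Int) ≤ (ps.length : Int)) && pvLeads ps pf)) = true then
               (pf.length : Int) + (ps.length : Int)
             else 0) := by
        intro hone
        have hlen : (pf.length = ps.length ∨ pf.length = ps.length + 1) ∨
            (ps.length = pf.length ∨ ps.length = pf.length + 1) := by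
          rcases hone with h | h
          · exact Or.inl (hL2pq.mpr h).1
          · exact Or.inr (hL2qp.mpr h).1
        rw [if_neg (by omega)]
        rw [if_pos (by
          rcases hone with h | h
          · have hh := hL2pq.mpr h
            refine Bool.or_eq_true_iff.mpr (Or.inl ?_)
            rw [Bool.and_eq_true]
            exact ⟨decide_eq_true (by exact_mod_cast by omega : (ps.length : Int) ≤ (pf.length : Int)), hh.2⟩
          · have hh := hL2qp.mpr h
            refine Bool.or_eq_true_iff.mpr (Or.inr ?_)
            rw [Bool.and_eq_true]
            exact ⟨decide_eq_true (by exact_mod_cast by omega : (pf.length : Int) ≤ (ps.length : Int)), hh.2⟩)]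
        rw [hNM]; push_cast; ring
      apply hgoal
      cases hhd : F.head? with
      | none =>
        have : F = [] := List.head?_eq_none_iff.mp hhd
        exact Or.inl (hpatp.mpr ⟨hadjf, by intro c hc; rw [this] at hc; cases hc⟩)
      | some e =>
        have hmem : e ∈ F := List.mem_of_mem_head? hhd
        have hmem' : e ∈ l.filter (fun c => p c || q c) := hF ▸ hmem
        have : (p e || q e) = true := by
          have := List.mem_filter.mp hmem'
          simpa using this.2
        rcases Bool.or_eq_true_iff.mp this with hpe | hqe
        · exact Or.inl (hpatp.mpr ⟨hadjf, by
            intro c hc; rw [hhd] at hc; cases hc; exact hpe⟩)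
        · exact Or.inr (hpatq.mpr ⟨hadjf, by
            intro c hc; rw [hhd] at hc; cases hc; exact hqe⟩)
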